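-- pv_equiv track=rewrite | github.com/ertgl/clsx | hack/scripts/format_exported_py_symbols.py | get_export_expression_span
-- ===== SOURCE A (Python) =====
-- import operator
-- from typing import (
--     Iterable,
--     ParamSpec,
--     TextIO,
--     TypeVar,
--     cast,
-- )
--
-- def get_export_expression_span(
--     source: str,
-- ) -> tuple[tuple[int, int, int], tuple[int, int, int]]:
--     line_no = 1
--     column_no = 0
--     start_line_no = -1
--     start_column_no = -1
--     start_offset = -1
--     end_line_no = -1
--     end_column_no = -1
--     end_offset = -1
--     lookbehind: list[tuple[tuple[int, int, int], str]] = []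
--     prefix = "__all__=["
--     prefix_chars = list(prefix)
--     for char_index, char in cast(Iterable[tuple[int, str]], enumerate(source)):
--         if char == "\n":
--             line_no += 1
--             column_no = 0
--         else:
--             column_no += 1
--         if start_offset == -1:
--             if not (char.isspace() or char == "\\"):
--                 lookbehind.append(((line_no, column_no, char_index), char))
--                 if len(lookbehind) > len(prefix_chars):
--                     lookbehind.pop(0)
--             if len(lookbehind) > 0:
--                 lookbehind_value = list(map(operator.itemgetter(1), lookbehind))
--                 found_prefix = lookbehind_value == prefix_chars
--                 is_prefix_at_start = lookbehind[0][0][1] == 1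
--                 if found_prefix and is_prefix_at_start:
--                     lookbehind.clear()
--                     start_line_no = line_no
--                     start_column_no = column_no
--                     start_offset = char_index
--         if start_offset != -1 and char == "]":
--             end_line_no = line_no
--             end_column_no = column_no
--             end_offset = char_index
--             break
--     start = start_line_no, start_column_no, start_offset
--     end = end_line_no, end_column_no, end_offset
--     return start, end
-- ===== SOURCE B (Python) =====
-- def get_export_expression_span(source):
--     prefix = list("__all__=[")
--     # one pass: decorated list of significant chars (position, char)
--     sig = []
--     line, col = 1, 0
--     for i, ch in enumerate(source):
--         if ch == "\n":
--             line, col = line + 1, 0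
--         else:
--             col += 1
--         if not (ch.isspace() or ch == "\\"):
--             sig.append(((line, col, i), ch))
--     # scan 9-char windows of the significant chars for the prefix at column 1
--     for j in range(len(sig) - 8):
--         if sig[j][0][1] == 1 and [t[1] for t in sig[j:j + 9]] == prefix:
--             start = sig[j + 8][0]
--             # every "]" is a significant char, so the first "]" after the
--             # start offset is the first "]" in the remaining significant chars
--             for pos, ch in sig[j + 9:]:
--                 if ch == "]":
--                     return start, pos
--             return start, (-1, -1, -1)
--     return (-1, -1, -1), (-1, -1, -1)
-- ===== Notes on version B (the rewrite author's own statement) =====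
-- stated objective: alternative
-- what changed: Replaces A's single stateful loop (sliding lookbehind deque popped in place, mode switch via start_offset sentinel, running end search) by a pipeline: build the decorated list of significant characters once, then scan its 9-char windows for the prefix anchored at column 1, then take the first ']' from the remaining decorated list.
import Mathlib
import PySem

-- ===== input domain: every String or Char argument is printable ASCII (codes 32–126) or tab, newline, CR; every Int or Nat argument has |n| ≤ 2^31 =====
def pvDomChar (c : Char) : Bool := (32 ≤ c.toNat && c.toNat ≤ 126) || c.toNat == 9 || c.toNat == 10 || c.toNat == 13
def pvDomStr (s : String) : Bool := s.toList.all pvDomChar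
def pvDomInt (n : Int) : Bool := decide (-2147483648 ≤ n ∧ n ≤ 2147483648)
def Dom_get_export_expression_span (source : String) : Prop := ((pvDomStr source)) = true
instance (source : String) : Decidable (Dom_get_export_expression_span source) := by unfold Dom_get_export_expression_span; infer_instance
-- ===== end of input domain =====

-- B rebuilds A's single stateful sliding-window loop as a three-stage pipeline (decorate significant chars, window-scan, find ']'); alternative structure, same cost.

-- ===== PORT A =====
def aPrefix : List Char := "__all__=[".toList

-- A's running loop: remaining chars, char_index, line_no, column_no, (start_line_no, start_column_no, start_offset), lookbehind
def aLoop : List Char → Int → Int → Int → (Int × Int × Int) → List ((Int × Int × Int) × Char) → (Int × Int × Int) × (Int × Int × Int)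
  | [], _, _, _, s, _ => (s, (-1, -1, -1))
  | c :: rest, i, line, col, s, lb =>
    let line' := if c = '\n' then line + 1 else line
    let col' := if c = '\n' then 0 else col + 1
    if s.2.2 = -1 then
      let lb1 :=
        if ¬ (PySem.Chars.isspace c || c = '\\') then
          let lb0 := lb ++ [((line', col', i), c)]
          if lb0.length > aPrefix.length then lb0.tail else lb0
        else lb
      if lb1.length > 0 ∧ lb1.map Prod.snd = aPrefix ∧ (lb1.headD ((0,0,0), ' ')).1.2.1 = 1 then
        if c = ']' then ((line', col', i), (line', col', i))
        else aLoop rest (i + 1) line' col' (line', col', i) []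
      else aLoop rest (i + 1) line' col' s lb1
    else
      if c = ']' then (s, (line', col', i))
      else aLoop rest (i + 1) line' col' s lb

def get_export_expression_span (source : String) : (Int × Int × Int) × (Int × Int × Int) :=
  aLoop source.toList 0 1 0 (-1, -1, -1) []

-- ===== PORT B =====
def bPrefix : List Char := "__all__=[".toList

-- stage 1: the decorated list of significant characters ((line, col, offset), char)
def bSig : List Char → Int → Int → Int → List ((Int × Int × Int) × Char)
  | [], _, _, _ => []
  | c :: rest, line, col, i =>
    let line' := if c = '\n' then line + 1 else line
    let col' := if c = '\n' then 0 else col + 1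
    if ¬ (PySem.Chars.isspace c || c = '\\') then ((line', col', i), c) :: bSig rest line' col' (i + 1)
    else bSig rest line' col' (i + 1)

-- stage 3: first ']' in the remaining decorated list
def bFindEnd : List ((Int × Int × Int) × Char) → Int × Int × Int
  | [] => (-1, -1, -1)
  | (pos, ch) :: rest => if ch = ']' then pos else bFindEnd rest

-- stage 2: scan the 9-char windows for the prefix anchored at column 1
def bScan : List ((Int × Int × Int) × Char) → (Int × Int × Int) × (Int × Int × Int)
  | [] => ((-1, -1, -1), (-1, -1, -1))
  | x :: rest =>
    let w := x :: rest.take 8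
    if x.1.2.1 = 1 ∧ w.map Prod.snd = bPrefix then
      ((w.getLastD x).1, bFindEnd (rest.drop 8))
    else bScan rest

def get_export_expression_span_alt (source : String) : (Int × Int × Int) × (Int × Int × Int) :=
  bScan (bSig source.toList 1 0 0)

-- ===== PRECONDITION & SPEC =====
def Spec_get_export_expression_span (source : String) (out : (Int × Int × Int) × (Int × Int × Int)) : Prop := out = get_export_expression_span_alt source
instance (source : String) (out : (Int × Int × Int) × (Int × Int × Int)) : Decidable (Spec_get_export_expression_span source out) := by unfold Spec_get_export_expression_span; infer_instance

-- ===== CLAIM (what is proved, stated in full; the proofs are below) =====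
def Claim_equal_get_export_expression_span : Prop := ∀ (source : String), Dom_get_export_expression_span source → Spec_get_export_expression_span source (get_export_expression_span source)

-- ===== LEMMAS AND PROOFS =====

-- the trigger condition A tests on its lookbehind buffer
abbrev pvTrig (lb : List ((Int × Int × Int) × Char)) : Prop :=
  lb.length > 0 ∧ lb.map Prod.snd = aPrefix ∧ (lb.headD ((0,0,0), ' ')).1.2.1 = 1

theorem aPrefix_len : aPrefix.length = 9 := by decide

theorem bPrefix_len : bPrefix.length = 9 := by decide

theorem aPrefix_last : aPrefix.getLast? = some '[' := by decide

theorem aLoop_nil (i line col : Int) (s : Int × Int × Int) (lb : List ((Int × Int × Int) × Char)) :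
    aLoop [] i line col s lb = (s, (-1, -1, -1)) := rfl

theorem aLoop_cons (c : Char) (rest : List Char) (i line col : Int) (s : Int × Int × Int)
    (lb : List ((Int × Int × Int) × Char)) :
    aLoop (c :: rest) i line col s lb =
      (let line' := if c = '\n' then line + 1 else line
       let col' := if c = '\n' then 0 else col + 1
       if s.2.2 = -1 then
         let lb1 :=
           if ¬ (PySem.Chars.isspace c || c = '\\') then
             let lb0 := lb ++ [((line', col', i), c)]
             if lb0.length > aPrefix.length then lb0.tail else lb0
           else lb
         if lb1.length > 0 ∧ lb1.map Prod.snd = aPrefix ∧ (lb1.headD ((0,0,0), ' ')).1.2.1 = 1 then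
           if c = ']' then ((line', col', i), (line', col', i))
           else aLoop rest (i + 1) line' col' (line', col', i) []
         else aLoop rest (i + 1) line' col' s lb1
       else
         if c = ']' then (s, (line', col', i))
         else aLoop rest (i + 1) line' col' s lb) := rfl

theorem bSig_nil (line col i : Int) : bSig [] line col i = [] := rfl

theorem bSig_cons (c : Char) (rest : List Char) (line col i : Int) :
    bSig (c :: rest) line col i =
      (let line' := if c = '\n' then line + 1 else line
       let col' := if c = '\n' then 0 else col + 1
       if ¬ (PySem.Chars.isspace c || c = '\\') then ((line', col', i), c) :: bSig rest line' col' (i + 1)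
       else bSig rest line' col' (i + 1)) := rfl

theorem bFindEnd_cons (pos : Int × Int × Int) (ch : Char) (rest : List ((Int × Int × Int) × Char)) :
    bFindEnd ((pos, ch) :: rest) = if ch = ']' then pos else bFindEnd rest := rfl

theorem bScan_cons (x : (Int × Int × Int) × Char) (rest : List ((Int × Int × Int) × Char)) :
    bScan (x :: rest) =
      (let w := x :: rest.take 8
       if x.1.2.1 = 1 ∧ w.map Prod.snd = bPrefix then
         ((w.getLastD x).1, bFindEnd (rest.drop 8))
       else bScan rest) := rfl

theorem bScan_short : ∀ (l : List ((Int × Int × Int) × Char)), l.length < 9 →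
    bScan l = ((-1, -1, -1), (-1, -1, -1))
  | [], _ => rfl
  | x :: rest, h => by
    simp only [bScan_cons]
    have hw : ¬ (x.1.2.1 = 1 ∧ (x :: rest.take 8).map Prod.snd = bPrefix) := by
      rintro ⟨-, h2⟩
      have hl := congrArg List.length h2
      rw [List.length_map, bPrefix_len] at hl
      simp only [List.length_cons, List.length_take] at hl
      simp only [List.length_cons] at h
      omega
    rw [if_neg hw]
    exact bScan_short rest (by simp only [List.length_cons] at h; omega)

theorem bScan_cond_iff (x : (Int × Int × Int) × Char) (t : List ((Int × Int × Int) × Char)) :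
    (x.1.2.1 = 1 ∧ (x :: t).map Prod.snd = bPrefix) ↔ pvTrig (x :: t) := by
  simp only [pvTrig, aPrefix, bPrefix, List.headD_cons, List.length_cons, gt_iff_lt]
  constructor
  · rintro ⟨h1, h2⟩; exact ⟨by omega, h2, h1⟩
  · rintro ⟨-, h2, h3⟩; exact ⟨h3, h2⟩

theorem bScan_window9_pos (l : List ((Int × Int × Int) × Char)) (hl : l.length = 9)
    (r : List ((Int × Int × Int) × Char)) (hp : pvTrig l) :
    bScan (l ++ r) = ((l.getLastD ((0,0,0), ' ')).1, bFindEnd r) := by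
  match l, hl, hp with
  | x :: t, hl, hp =>
    have ht : t.length = 8 := by simpa using hl
    have htake : (t ++ r).take 8 = t := List.take_left' ht
    have hdrop : (t ++ r).drop 8 = r := List.drop_left' ht
    have hlast : (x :: t).getLastD x = (x :: t).getLastD ((0,0,0), ' ') := by
      rw [List.getLastD_eq_getLast?, List.getLastD_eq_getLast?]
      cases hgl : (x :: t).getLast? with
      | none => simp at hgl
      | some y => simp
    show bScan (x :: (t ++ r)) = _
    simp only [bScan_cons, htake, hdrop, hlast]
    rw [if_pos ((bScan_cond_iff x t).mpr hp)]

theorem bScan_window9_neg (l : List ((Int × Int × Int) × Char)) (hl : l.length = 9)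
    (r : List ((Int × Int × Int) × Char)) (hnp : ¬ pvTrig l) :
    bScan (l ++ r) = bScan (l.tail ++ r) := by
  match l, hl, hnp with
  | x :: t, hl, hnp =>
    have ht : t.length = 8 := by simpa using hl
    have htake : (t ++ r).take 8 = t := List.take_left' ht
    show bScan (x :: (t ++ r)) = _
    simp only [bScan_cons, htake]
    rw [if_neg (fun hc => hnp ((bScan_cond_iff x t).mp hc))]
    rfl

theorem bScan_no_trig (lb : List ((Int × Int × Int) × Char)) (hlen : lb.length ≤ 9)
    (hnt : ¬ pvTrig lb) : bScan lb = ((-1, -1, -1), (-1, -1, -1)) := by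
  rcases Nat.lt_or_ge lb.length 9 with h | h
  · exact bScan_short lb h
  · have hl : lb.length = 9 := le_antisymm hlen h
    have hw := bScan_window9_neg lb hl [] hnt
    rw [List.append_nil, List.append_nil] at hw
    rw [hw]
    exact bScan_short lb.tail (by simp [List.length_tail, hl])

theorem isspace_rbracket : (PySem.Chars.isspace ']' || decide (']' = '\\')) = false := by decide

theorem aLoop_found : ∀ (chars : List Char) (i line col : Int) (s : Int × Int × Int)
    (lb : List ((Int × Int × Int) × Char)), s.2.2 ≠ -1 →
    aLoop chars i line col s lb = (s, bFindEnd (bSig chars line col i))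
  | [], _, _, _, _, _, _ => rfl
  | c :: rest, i, line, col, s, lb, h => by
    simp only [aLoop_cons, bSig_cons]
    rw [if_neg h]
    by_cases hs : (PySem.Chars.isspace c || c = '\\') = true
    · -- c is skipped by bSig; since ']' is significant, c ≠ ']'
      have hc : c ≠ ']' := by
        rintro rfl
        rw [isspace_rbracket] at hs
        exact Bool.false_ne_true hs
      rw [if_neg hc, if_neg (not_not_intro hs)]
      exact aLoop_found rest (i + 1) _ _ s lb h
    · rw [if_pos hs, bFindEnd_cons]
      by_cases hc : c = ']'
      · rw [if_pos hc, if_pos hc]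
      · rw [if_neg hc, if_neg hc]
        exact aLoop_found rest (i + 1) _ _ s lb h

theorem aLoop_search : ∀ (chars : List Char) (i line col : Int), 0 ≤ i →
    ∀ (lb : List ((Int × Int × Int) × Char)), lb.length ≤ 9 → ¬ pvTrig lb →
    aLoop chars i line col (-1, -1, -1) lb = bScan (lb ++ bSig chars line col i)
  | [], i, line, col, _, lb, hlen, hnt => by
    rw [aLoop_nil, bSig_nil, List.append_nil, bScan_no_trig lb hlen hnt]
  | c :: rest, i, line, col, hi, lb, hlen, hnt => by
    have hi' : (0:Int) ≤ i + 1 := by omega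
    simp only [aLoop_cons, bSig_cons]
    rw [if_pos trivial]
    set L : Int := if c = '\n' then line + 1 else line with hL
    set C : Int := if c = '\n' then 0 else col + 1 with hC
    by_cases hs : (PySem.Chars.isspace c || c = '\\') = true
    · -- whitespace/backslash: lookbehind unchanged, no new significant char
      rw [if_neg (not_not_intro hs), if_neg (not_not_intro hs), if_neg hnt]
      exact aLoop_search rest (i + 1) L C hi' lb hlen hnt
    · rw [if_pos hs, if_pos hs]
      set nw : (Int × Int × Int) × Char := ((L, C, i), c) with hnw
      rcases Nat.lt_or_ge lb.length 9 with hlb | hlb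
      · -- lookbehind not yet full: lb1 = lb ++ [nw]
        have hgt : ¬ (lb ++ [nw]).length > aPrefix.length := by
          rw [aPrefix_len]; simp only [List.length_append, List.length_cons, List.length_nil]; omega
        rw [if_neg hgt]
        have hassoc : lb ++ nw :: bSig rest L C (i + 1) = (lb ++ [nw]) ++ bSig rest L C (i + 1) := by
          simp
        by_cases hf : pvTrig (lb ++ [nw])
        · rw [if_pos hf]
          have hlen9 : (lb ++ [nw]).length = 9 := by
            have hml := congrArg List.length hf.2.1
            rwa [List.length_map, aPrefix_len] at hml
          have hc : c = '[' := by
            have hgl := congrArg List.getLast? hf.2.1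
            rw [List.map_append] at hgl
            simp only [List.map_cons, List.map_nil, List.getLast?_concat, aPrefix_last,
              Option.some.injEq] at hgl
            exact hgl
          have hcne : c ≠ ']' := by rw [hc]; decide
          rw [if_neg hcne]
          rw [aLoop_found rest (i + 1) L C (L, C, i) []
            (by show i ≠ -1; omega)]
          rw [hassoc, bScan_window9_pos _ hlen9 _ hf]
          simp [List.getLastD_eq_getLast?, hnw]
        · rw [if_neg hf]
          rw [aLoop_search rest (i + 1) L C hi' (lb ++ [nw])
            (by simp only [List.length_append, List.length_cons, List.length_nil]; omega) hf]
          rw [hassoc]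
      · -- lookbehind full: lb1 = (lb ++ [nw]).tail = lb.tail ++ [nw]
        have hlb9 : lb.length = 9 := le_antisymm hlen hlb
        have hgt : (lb ++ [nw]).length > aPrefix.length := by
          rw [aPrefix_len]; simp only [List.length_append, List.length_cons, List.length_nil]; omega
        rw [if_pos hgt]
        have htail : (lb ++ [nw]).tail = lb.tail ++ [nw] := by
          cases lb with
          | nil => simp at hlb9
          | cons y t => simp
        rw [htail]
        have hlen1 : (lb.tail ++ [nw]).length = 9 := by
          simp only [List.length_append, List.length_tail, List.length_cons, List.length_nil, hlb9]
        rw [bScan_window9_neg lb hlb9 (nw :: bSig rest L C (i + 1)) hnt]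
        have hassoc : lb.tail ++ nw :: bSig rest L C (i + 1) = (lb.tail ++ [nw]) ++ bSig rest L C (i + 1) := by
          simp
        rw [hassoc]
        by_cases hf : pvTrig (lb.tail ++ [nw])
        · rw [if_pos hf]
          have hc : c = '[' := by
            have hgl := congrArg List.getLast? hf.2.1
            rw [List.map_append] at hgl
            simp only [List.map_cons, List.map_nil, List.getLast?_concat, aPrefix_last,
              Option.some.injEq] at hgl
            exact hgl
          have hcne : c ≠ ']' := by rw [hc]; decide
          rw [if_neg hcne]
          rw [aLoop_found rest (i + 1) L C (L, C, i) []
            (by show i ≠ -1; omega)]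
          rw [bScan_window9_pos _ hlen1 _ hf]
          simp [List.getLastD_eq_getLast?, hnw]
        · rw [if_neg hf]
          exact aLoop_search rest (i + 1) L C hi' (lb.tail ++ [nw]) (by omega) hf

-- ===== VERDICT (by name: the statement is the Claim_ definition above) =====
theorem get_export_expression_span_spec : Claim_equal_get_export_expression_span := by
  intro source _
  unfold Spec_get_export_expression_span get_export_expression_span get_export_expression_span_alt
  have h := aLoop_search source.toList 0 1 0 (by norm_num) [] (by simp) (by simp [pvTrig])
  simpa using h
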